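-- pv_equiv track=rewrite | github.com/svenvanhasselt/Adventofcode | 2023/Day 7/puzzle2.py | three_kind_house
-- ===== SOURCE A (Python) =====
-- def three_kind_house(string_check, check_list):
--     for char, count in check_list.items():
--         if count == 3:
--             for char1, count1 in check_list.items():
--                 if count1 == 2:
--                     return 5
--                 elif count1 == 1:
--                     return 4
--     return 0
-- ===== SOURCE B (Python) =====
-- def three_kind_house(string_check, check_list):
--     # One backward pass with an accumulator: track whether any count is 3,
--     # and the leftmost count in {1, 2} (backward fold: last assignment = leftmost).
--     has_three = False
--     first_small = None
--     for count in reversed(list(check_list.values())):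
--         if count == 3:
--             has_three = True
--         elif count == 1 or count == 2:
--             first_small = count
--     if has_three:
--         return {2: 5, 1: 4}.get(first_small, 0)
--     return 0
-- ===== Notes on version B (the rewrite author's own statement) =====
-- stated objective: alternative
-- what changed: Replaces A's nested early-return loops by a single backward fold over the counts accumulating a has-three flag and the leftmost count in {1,2}, then a table lookup {2:5,1:4} for the result.
import Mathlib
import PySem

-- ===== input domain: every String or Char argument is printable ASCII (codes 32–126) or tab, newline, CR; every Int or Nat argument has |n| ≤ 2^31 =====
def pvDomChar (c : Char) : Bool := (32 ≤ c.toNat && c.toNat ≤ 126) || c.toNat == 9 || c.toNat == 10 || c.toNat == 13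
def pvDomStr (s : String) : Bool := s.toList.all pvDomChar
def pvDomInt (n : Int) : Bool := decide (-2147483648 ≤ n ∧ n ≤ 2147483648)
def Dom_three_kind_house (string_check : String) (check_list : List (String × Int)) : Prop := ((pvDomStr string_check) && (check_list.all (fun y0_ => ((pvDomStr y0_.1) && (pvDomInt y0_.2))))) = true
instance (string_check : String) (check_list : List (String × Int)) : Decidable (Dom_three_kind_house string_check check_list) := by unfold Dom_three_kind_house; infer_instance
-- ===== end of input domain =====

-- B replaces A's nested early-return loops by one backward accumulator fold plus a table lookup (alternative decomposition).

-- ===== PORT A =====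
-- inner 'for char1, count1 in check_list.items()' loop: some 5 / some 4 on the first
-- count 2 / 1, none if the loop finishes without returning
def pvAInner : List (String × Int) → Option Int
  | [] => none
  | (_, c) :: rest => if c == 2 then some 5 else if c == 1 then some 4 else pvAInner rest

-- outer loop; 'full' is the whole dict the inner loop scans
def pvAOuter (full : List (String × Int)) : List (String × Int) → Int
  | [] => 0
  | (_, c) :: rest =>
      if c == 3 then
        match pvAInner full with
        | some v => v
        | none => pvAOuter full rest
      else pvAOuter full rest

def three_kind_house (string_check : String) (check_list : List (String × Int)) : Int :=
  pvAOuter check_list check_list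

-- ===== PORT B =====
-- Source B's loop body: state = (has_three, first_small), iterated over the reversed values
def pvBStep (st : Bool × Option Int) (p : String × Int) : Bool × Option Int :=
  if p.2 == 3 then (true, st.2)
  else if p.2 == 1 || p.2 == 2 then (st.1, some p.2)
  else st

def three_kind_house_alt (string_check : String) (check_list : List (String × Int)) : Int :=
  let st := check_list.reverse.foldl pvBStep (false, none)
  if st.1 then
    match st.2 with
    | some v => PySem.Dict.getD (PySem.Dict.ofList [((2 : Int), (5 : Int)), (1, 4)]) v 0
    | none => 0
  else 0

-- ===== PRECONDITION & SPEC =====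
def Spec_three_kind_house (string_check : String) (check_list : List (String × Int)) (out : Int) : Prop := out = three_kind_house_alt string_check check_list
instance (string_check : String) (check_list : List (String × Int)) (out : Int) : Decidable (Spec_three_kind_house string_check check_list out) := by unfold Spec_three_kind_house; infer_instance

-- ===== CLAIM (what is proved, stated in full; the proofs are below) =====
def Claim_equal_three_kind_house : Prop := ∀ (string_check : String) (check_list : List (String × Int)), Dom_three_kind_house string_check check_list → Spec_three_kind_house string_check check_list (three_kind_house string_check check_list)

-- ===== LEMMAS AND PROOFS =====

theorem pvBStep_fst (st : Bool × Option Int) (p : String × Int) :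
    (pvBStep st p).1 = (st.1 || (p.2 == 3)) := by
  unfold pvBStep; split_ifs with h3 h12 <;> simp_all

theorem pvBStep_snd (st : Bool × Option Int) (p : String × Int) :
    (pvBStep st p).2 = if (p.2 == 1 || p.2 == 2) then some p.2 else st.2 := by
  unfold pvBStep; split_ifs with h3 h12 <;> simp_all

-- the backward fold computed as a structural (right) fold
theorem pvB_fold_eq_foldr (l : List (String × Int)) :
    l.reverse.foldl pvBStep (false, none) = l.foldr (fun a b => pvBStep b a) (false, none) := by
  rw [List.foldl_reverse]

-- first component of the fold state = "some count equals 3"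
theorem pvB_fst (l : List (String × Int)) :
    (l.foldr (fun a b => pvBStep b a) (false, none)).1 = l.any (fun p => p.2 == 3) := by
  induction l with
  | nil => rfl
  | cons h t ih =>
      rw [List.foldr_cons, pvBStep_fst, ih, List.any_cons, Bool.or_comm]

-- decoded second component = A's inner scan (with default 0)
theorem pvB_snd (l : List (String × Int)) :
    (match (l.foldr (fun a b => pvBStep b a) (false, none)).2 with
     | some v => PySem.Dict.getD (PySem.Dict.ofList [((2 : Int), (5 : Int)), (1, 4)]) v 0
     | none => 0) = (pvAInner l).getD 0 := by
  induction l with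
  | nil => rfl
  | cons h t ih =>
      obtain ⟨s, c⟩ := h
      rw [List.foldr_cons, pvBStep_snd]
      by_cases h1 : c = 1
      · subst h1; simp [pvAInner]; decide
      · by_cases h2 : c = 2
        · subst h2; simp [pvAInner]; decide
        · have hc : ((c : Int) == 1 || c == 2) = false := by simp [h1, h2]
          rw [hc]
          simpa [pvAInner, h1, h2] using ih

-- A's outer loop: 0 unless some count is 3, else the inner scan's value (default 0)
theorem pvAOuter_eq (full sub : List (String × Int)) :
    pvAOuter full sub =
      if sub.any (fun p => p.2 == 3) then (pvAInner full).getD 0 else 0 := by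
  induction sub with
  | nil => rfl
  | cons h t ih =>
      obtain ⟨s, c⟩ := h
      by_cases hc : c = 3
      · subst hc
        simp only [pvAOuter, List.any_cons, beq_self_eq_true, Bool.true_or, if_pos]
        cases hin : pvAInner full <;> simp [hin, ih]
      · have hc' : (c == 3) = false := by simpa using hc
        simp only [pvAOuter, List.any_cons, hc', Bool.false_eq_true, if_false, Bool.false_or]
        exact ih

-- ===== VERDICT (by name: the statement is the Claim_ definition above) =====
theorem three_kind_house_spec : Claim_equal_three_kind_house := by
  intro s l _
  unfold Spec_three_kind_house three_kind_house three_kind_house_alt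
  rw [pvAOuter_eq, pvB_fold_eq_foldr, ← pvB_fst l, ← pvB_snd l]
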